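-- pv_equiv track=rewrite | github.com/thd-research/regelum-control | rcognita/_Plugins__fake_file_config_source.py | numerize_string
-- ===== SOURCE A (Python) =====
-- def numerize_string(s):
--     new_s = ""
--     string_kind = ""
--     chr_terms = []
--     for char in s:
--         if string_kind:
--             if char == string_kind:
--                 string_kind = ""
--                 new_s = new_s + "+".join(chr_terms) + ")"
--                 chr_terms = []
--             else:
--                 code = ord(char)
--                 chr_terms.append(f"chr({code})")
--         else:
--             if char == '"' or char == "'":
--                 string_kind = char
--                 new_s = new_s + "("
--             else:
--                 new_s = new_s + char
--     return new_s
-- ===== SOURCE B (Python) =====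
-- def numerize_string(s):
--     parts = []
--     i = 0
--     n = len(s)
--     while i < n:
--         c = s[i]
--         if c == '"' or c == "'":
--             j = s.find(c, i + 1)
--             if j == -1:
--                 parts.append("(")
--                 break
--             parts.append("(" + "+".join(f"chr({ord(ch)})" for ch in s[i + 1:j]) + ")")
--             i = j + 1
--         else:
--             parts.append(c)
--             i += 1
--     return "".join(parts)
-- ===== Notes on version B (the rewrite author's own statement) =====
-- stated objective: alternative
-- what changed: Replaced A's per-character state machine (string_kind flag plus an accumulating chr_terms list) with an index walk that, on each opening quote, locates the matching close via s.find and emits the whole quoted slice at once.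
import Mathlib
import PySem

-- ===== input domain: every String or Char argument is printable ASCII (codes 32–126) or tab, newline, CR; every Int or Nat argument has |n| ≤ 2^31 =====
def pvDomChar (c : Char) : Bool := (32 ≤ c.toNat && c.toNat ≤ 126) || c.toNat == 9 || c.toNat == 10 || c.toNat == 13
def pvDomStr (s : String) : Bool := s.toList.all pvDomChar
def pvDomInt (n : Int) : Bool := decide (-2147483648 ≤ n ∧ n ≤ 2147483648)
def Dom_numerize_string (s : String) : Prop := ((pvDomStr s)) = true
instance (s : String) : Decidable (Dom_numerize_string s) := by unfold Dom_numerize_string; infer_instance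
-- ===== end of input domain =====

-- B re-implements A's per-character state machine as a find-and-slice walk over quoted
-- regions (objective: alternative decomposition, same O(n) cost).

-- ===== PORT A =====
-- the loop of A, carried as structural recursion over the remaining characters with the
-- same state (new_s, string_kind, chr_terms); string_kind '' is Option.none
def numerizeLoop (new_s : String) (string_kind : Option Char) (chr_terms : List String) :
    List Char → String
  | [] => new_s
  | c :: rest =>
    match string_kind with
    | some q =>
      if c = q then
        numerizeLoop (new_s ++ String.intercalate "+" chr_terms ++ ")") none [] rest
      else
        numerizeLoop new_s (some q)
          (chr_terms ++ ["chr(" ++ PySem.Int.toStr (Int.ofNat c.toNat) ++ ")"]) rest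
    | none =>
      if c = '"' ∨ c = '\'' then
        numerizeLoop (new_s ++ "(") (some c) chr_terms rest
      else
        numerizeLoop (new_s ++ c.toString) none chr_terms rest

def numerize_string (s : String) : String :=
  numerizeLoop "" none [] s.toList

-- ===== PORT B =====
-- "+".join(f"chr({ord(ch)})" for ch in inside)
def bJoin (inside : List Char) : String :=
  String.intercalate "+" (inside.map fun ch => "chr(" ++ PySem.Int.toStr (Int.ofNat ch.toNat) ++ ")")

-- Source B's index walk: on a quote, s.find(c, i+1) / the slice s[i+1:j] become
-- dropWhile / takeWhile on the remaining characters (exact: find = first matching position)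
def bGo : List Char → String
  | [] => ""
  | c :: rest =>
    if c = '"' ∨ c = '\'' then
      let post := rest.dropWhile (· ≠ c)
      if post.isEmpty then "("
      else "(" ++ bJoin (rest.takeWhile (· ≠ c)) ++ ")" ++ bGo post.tail
    else
      c.toString ++ bGo rest
  termination_by cs => cs.length
  decreasing_by
    · have h1 : (rest.dropWhile (· ≠ c)).length ≤ rest.length := List.length_dropWhile_le _ _
      have h2 : (rest.dropWhile (· ≠ c)).tail.length = (rest.dropWhile (· ≠ c)).length - 1 :=
        List.length_tail
      simp only [List.length_cons]
      omega
    · simp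

def numerize_string_alt (s : String) : String :=
  bGo s.toList

-- ===== PRECONDITION & SPEC =====
def Spec_numerize_string (s : String) (out : String) : Prop := out = numerize_string_alt s
instance (s : String) (out : String) : Decidable (Spec_numerize_string s out) := by unfold Spec_numerize_string; infer_instance

-- ===== CLAIM (what is proved, stated in full; the proofs are below) =====
def Claim_equal_numerize_string : Prop := ∀ (s : String), Dom_numerize_string s → Spec_numerize_string s (numerize_string s)

-- ===== LEMMAS AND PROOFS =====

-- new_s is only appended to: factor the accumulator out
theorem numerizeLoop_prefix (cs : List Char) :
    ∀ (acc : String) (k : Option Char) (t : List String),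
      numerizeLoop acc k t cs = acc ++ numerizeLoop "" k t cs := by
  induction cs with
  | nil => intro acc k t; simp [numerizeLoop]
  | cons c rest ih =>
    intro acc k t
    cases k with
    | some q =>
      by_cases hc : c = q
      · simp only [numerizeLoop, hc, if_true]
        rw [ih]
        conv_rhs => rw [ih]
        simp [String.append_assoc]
      · simp only [numerizeLoop, hc, if_false]
        exact ih _ _ _
    | none =>
      by_cases hc : c = '"' ∨ c = '\''
      · simp only [numerizeLoop, hc, if_true]
        rw [ih]
        conv_rhs => rw [ih]
        simp [String.append_assoc]
      · simp only [numerizeLoop, hc, if_false]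
        rw [ih]
        conv_rhs => rw [ih]
        simp [String.append_assoc, -String.append_singleton]

-- inside a quoted region A scans to the matching close, emitting the joined chr-terms
theorem numerizeLoop_inside (q : Char) (cs : List Char) :
    ∀ (t : List String),
      numerizeLoop "" (some q) t cs =
        if (cs.dropWhile (· ≠ q)).isEmpty then ""
        else
          String.intercalate "+"
              (t ++ (cs.takeWhile (· ≠ q)).map
                fun ch => "chr(" ++ PySem.Int.toStr (Int.ofNat ch.toNat) ++ ")")
            ++ ")" ++ numerizeLoop "" none [] (cs.dropWhile (· ≠ q)).tail := by
  induction cs with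
  | nil => intro t; simp [numerizeLoop]
  | cons c rest ih =>
    intro t
    by_cases hc : c = q
    · subst hc
      simp only [numerizeLoop]
      rw [numerizeLoop_prefix]
      simp [List.dropWhile, List.takeWhile, String.append_assoc]
    · have hd : (c :: rest).dropWhile (· ≠ q) = rest.dropWhile (· ≠ q) := by
        simp [List.dropWhile, hc]
      have ht : (c :: rest).takeWhile (· ≠ q) = c :: rest.takeWhile (· ≠ q) := by
        simp [List.takeWhile, hc]
      simp only [numerizeLoop, hc, if_false, ih, hd, ht]
      by_cases he : (rest.dropWhile (· ≠ q)).isEmpty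
      · simp
      · simp [List.map_cons, List.append_assoc]

-- main loop equivalence
theorem loop_eq_bGo (cs : List Char) : numerizeLoop "" none [] cs = bGo cs := by
  induction cs using bGo.induct with
  | case1 => simp [numerizeLoop, bGo]
  | case2 c rest hq post hpost =>
    simp only [post] at hpost
    rw [bGo]
    simp only [hq, hpost, if_pos]
    simp only [numerizeLoop, hq, if_true]
    rw [numerizeLoop_prefix, numerizeLoop_inside]
    have hnot : c ∉ rest := by
      rw [List.isEmpty_iff, List.dropWhile_eq_nil_iff] at hpost
      intro hm
      simpa using hpost c hm
    simp [hnot]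
  | case3 c rest hq post hpost ih =>
    simp only [post] at hpost ih
    rw [bGo]
    simp only [hq, if_true]
    rw [if_neg hpost]
    simp only [numerizeLoop, hq, if_true]
    rw [numerizeLoop_prefix, numerizeLoop_inside, if_neg hpost, ih]
    simp [bJoin, String.append_assoc]
  | case4 c rest hq ih =>
    rw [bGo]
    simp only [hq, if_false]
    simp only [numerizeLoop, hq, if_false]
    rw [numerizeLoop_prefix, ih]
    simp [String.singleton]

-- ===== VERDICT (by name: the statement is the Claim_ definition above) =====
theorem numerize_string_spec : Claim_equal_numerize_string := by
  intro s _
  unfold Spec_numerize_string numerize_string numerize_string_alt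
  exact loop_eq_bGo s.toList
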